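-- pv_equiv track=rewrite | github.com/maleylab/FORGE | labtools/tsgen/orca_io.py | _guess_atom_count
-- ===== SOURCE A (Python) =====
-- def _guess_atom_count(freqs, total_lines):
--     if not freqs:
--         return 0
--     n_modes = len(freqs)
--     for n in range(1, 2000):
--         if n_modes * n == total_lines:
--             return n
--     return int(total_lines / n_modes)
-- ===== SOURCE B (Python) =====
-- def _guess_atom_count(freqs, total_lines):
--     if not freqs:
--         return 0
--     n_modes = len(freqs)
--     if total_lines % n_modes == 0:
--         q = total_lines // n_modes
--         if 1 <= q < 2000:
--             return q
--     return int(total_lines / n_modes)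
-- ===== Notes on version B (the rewrite author's own statement) =====
-- stated objective: simpler
-- what changed: Replaces the 1..1999 linear scan for n with n_modes*n == total_lines by a single divisibility check (total_lines % n_modes == 0 and 1 <= quotient < 2000), keeping the float-division fallback unchanged.
import Mathlib
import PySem

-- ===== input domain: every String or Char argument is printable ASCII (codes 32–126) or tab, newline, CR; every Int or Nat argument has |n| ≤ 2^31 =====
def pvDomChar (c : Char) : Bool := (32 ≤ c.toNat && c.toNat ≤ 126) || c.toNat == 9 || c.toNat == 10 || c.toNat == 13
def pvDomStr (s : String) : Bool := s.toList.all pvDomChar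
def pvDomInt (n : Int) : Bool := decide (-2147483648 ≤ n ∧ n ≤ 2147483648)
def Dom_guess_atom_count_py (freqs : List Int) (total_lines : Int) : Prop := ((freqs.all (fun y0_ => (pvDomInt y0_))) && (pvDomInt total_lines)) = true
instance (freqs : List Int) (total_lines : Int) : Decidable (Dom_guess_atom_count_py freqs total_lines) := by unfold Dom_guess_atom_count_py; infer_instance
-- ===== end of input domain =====

-- B replaces A's 1..1999 scan by a single divisibility check (simpler, constant work).
-- Both fallbacks port Python's int(total_lines / n_modes) as Int.tdiv (truncation toward 0):
-- exact on Dom, since for |total_lines| ≤ 2^31 the float quotient never rounds across an integer.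

-- ===== PORT A =====
-- the for-loop with early return: first n in the list with n_modes * n == total_lines
def pvFindA (nm t : Int) : List Int → Option Int
  | [] => none
  | n :: rest => if nm * n = t then some n else pvFindA nm t rest

def guess_atom_count_py (freqs : List Int) (total_lines : Int) : Int :=
  if freqs = [] then 0
  else
    -- n_modes = len(freqs)
    match pvFindA (freqs.length : Int) total_lines (PySem.List.pyRange 1 2000 1) with
    | some n => n
    | none => Int.tdiv total_lines (freqs.length : Int)

-- ===== PORT B =====
def guess_atom_count_py_alt (freqs : List Int) (total_lines : Int) : Int :=
  if freqs = [] then 0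
  else
    -- n_modes = len(freqs); q = total_lines // n_modes
    if PySem.Int.mod total_lines (freqs.length : Int) = 0 then
      if 1 ≤ PySem.Int.floordiv total_lines (freqs.length : Int) ∧
          PySem.Int.floordiv total_lines (freqs.length : Int) < 2000 then
        PySem.Int.floordiv total_lines (freqs.length : Int)
      else Int.tdiv total_lines (freqs.length : Int)
    else Int.tdiv total_lines (freqs.length : Int)

-- ===== PRECONDITION & SPEC =====
def Spec_guess_atom_count_py (freqs : List Int) (total_lines : Int) (out : Int) : Prop := out = guess_atom_count_py_alt freqs total_lines
instance (freqs : List Int) (total_lines : Int) (out : Int) : Decidable (Spec_guess_atom_count_py freqs total_lines out) := by unfold Spec_guess_atom_count_py; infer_instance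

-- ===== CLAIM (what is proved, stated in full; the proofs are below) =====
def Claim_equal_guess_atom_count_py : Prop := ∀ (freqs : List Int) (total_lines : Int), Dom_guess_atom_count_py freqs total_lines → Spec_guess_atom_count_py freqs total_lines (guess_atom_count_py freqs total_lines)

-- ===== LEMMAS AND PROOFS =====

-- A's scan over range(a, 2000) finds exactly the quotient t / nm, when t is divisible by nm
-- and the quotient lies in [a, 2000).
lemma pvFindA_range (nm t : Int) (hnm : 0 < nm) :
    ∀ (k : Nat) (a : Int), a + k = 2000 →
    pvFindA nm t (PySem.List.pyRange a 2000 1) =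
      (if t % nm = 0 ∧ a ≤ t / nm ∧ t / nm < 2000 then some (t / nm) else none) := by
  intro k
  induction k with
  | zero =>
      intro a ha
      rw [PySem.List.pyRange_one_eq_nil (by omega)]
      rw [if_neg (by omega)]
      rfl
  | succ k ih =>
      intro a ha
      rw [PySem.List.pyRange_one_cons (show a < (2000:Int) by omega)]
      by_cases h : nm * a = t
      · have hm : t % nm = 0 := by rw [← h]; exact Int.mul_emod_right nm a
        have hq : t / nm = a := by rw [← h]; exact Int.mul_ediv_cancel_left a (by omega)
        simp only [pvFindA, if_pos h, hq]
        rw [if_pos ⟨hm, le_refl a, by omega⟩]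
      · simp only [pvFindA, if_neg h]
        rw [ih (a + 1) (by omega)]
        by_cases hm : t % nm = 0
        · have hne : t / nm ≠ a := by
            intro he
            apply h
            have hd := Int.mul_ediv_add_emod t nm
            rw [he, hm] at hd
            omega
          generalize t / nm = q at hne ⊢
          split_ifs with h1 h2 h3
          · rfl
          · exact absurd ⟨hm, by omega, h1.2.2⟩ h2
          · exact absurd ⟨hm, by omega, h3.2.2⟩ h1
          · rfl
        · rw [if_neg (fun hc => hm hc.1), if_neg (fun hc => hm hc.1)]

-- ===== VERDICT (by name: the statement is the Claim_ definition above) =====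
theorem guess_atom_count_py_spec : Claim_equal_guess_atom_count_py := by
  intro freqs t _
  unfold Spec_guess_atom_count_py guess_atom_count_py guess_atom_count_py_alt
  by_cases hf : freqs = []
  · rw [if_pos hf, if_pos hf]
  · have hnm : 0 < (freqs.length : Int) := by
      exact_mod_cast List.length_pos_iff.mpr hf
    rw [if_neg hf, if_neg hf]
    rw [pvFindA_range (freqs.length : Int) t hnm 1999 1 (by norm_num)]
    rw [PySem.Int.mod_eq_emod_of_pos hnm, PySem.Int.floordiv_eq_ediv_of_pos hnm]
    by_cases hc : t % (freqs.length : Int) = 0 ∧ 1 ≤ t / (freqs.length : Int) ∧ t / (freqs.length : Int) < 2000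
    · rw [if_pos hc]
      simp only [if_pos hc.1, if_pos hc.2]
    · rw [if_neg hc]
      split_ifs with h1 h2
      · exact absurd ⟨h1, h2⟩ hc
      · rfl
      · rfl
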